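-- pv_equiv track=rewrite | github.com/Eugleo/dibby | src/model/peptide.py | trypsin
-- ===== SOURCE A (Python) =====
-- def trypsin(protein):
--     last = 0
--     result = []
--     for i in range(len(protein) - 1):
--         if protein[i] in ["K", "R"] and protein[i + 1] != "P":
--             result.append((last, i + 1))
--             last = i + 1
--     result.append((last, len(protein)))
--     return result
-- ===== SOURCE B (Python) =====
-- def trypsin(protein):
--     n = len(protein)
--
--     def peptides(start):
--         # first cleavage point strictly after `start`, or None
--         j = next((j for j in range(start + 1, n)
--                   if protein[j - 1] in "KR" and protein[j] != "P"), None)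
--         if j is None:
--             return [(start, n)]
--         return [(start, j)] + peptides(j)
--
--     return peptides(0)
-- ===== Notes on version B (the rewrite author's own statement) =====
-- stated objective: alternative
-- what changed: Replaced A's single accumulator loop over residue positions by a recursive per-peptide decomposition: each call searches for the next cleavage point after the current start (via next over a generator) and emits one peptide, recursing from that cut.
import Mathlib
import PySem

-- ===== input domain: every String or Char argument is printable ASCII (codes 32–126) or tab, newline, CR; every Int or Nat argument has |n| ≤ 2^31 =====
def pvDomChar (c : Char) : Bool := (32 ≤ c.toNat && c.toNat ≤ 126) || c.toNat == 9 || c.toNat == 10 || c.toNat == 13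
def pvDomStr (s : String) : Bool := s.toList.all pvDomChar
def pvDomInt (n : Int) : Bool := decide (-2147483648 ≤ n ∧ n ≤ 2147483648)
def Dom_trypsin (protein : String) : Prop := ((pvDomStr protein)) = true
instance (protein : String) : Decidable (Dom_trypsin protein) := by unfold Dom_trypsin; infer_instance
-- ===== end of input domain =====

-- B replaces A's accumulator loop over residue positions by a recursive per-peptide
-- decomposition: find the next cleavage point after the current start, emit one
-- peptide, recurse (objective: alternative; same cost).

-- ===== PORT A =====
-- literal port of A: one loop carrying (last, result), emitting a pair and updating last.
def trypsin (protein : String) : List (Int × Int) :=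
  let cs := protein.toList
  let n : Int := PySem.Str.len protein
  let st :=
    (PySem.List.pyRange 0 (n - 1) 1).foldl
      (fun (st : Int × List (Int × Int)) i =>
        if ((PySem.List.pyGet? cs i == some 'K' || PySem.List.pyGet? cs i == some 'R')
            && !(PySem.List.pyGet? cs (i + 1) == some 'P'))
        then (i + 1, st.2 ++ [(st.1, i + 1)])
        else st)
      (0, [])
  st.2 ++ [(st.1, n)]

-- ===== PORT B =====
-- literal port of B's recursive `peptides(start)`: the Python recursion terminates because
-- `start` strictly increases and stays below n; here that is encoded with a fuel parameter
-- (n+1 calls always suffice), the standard structural-recursion rendering.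
def trypsinAltGo (cs : List Char) (n : Int) : Nat → Int → List (Int × Int)
  | 0, _ => []   -- never reached with the initial fuel
  | fuel + 1, start =>
    match (PySem.List.pyRange (start + 1) n 1).find?
        (fun j => (PySem.List.pyGet? cs (j - 1) == some 'K'
                    || PySem.List.pyGet? cs (j - 1) == some 'R')
                  && !(PySem.List.pyGet? cs j == some 'P')) with
    | none => [(start, n)]
    | some j => [(start, j)] ++ trypsinAltGo cs n fuel j

def trypsin_alt (protein : String) : List (Int × Int) :=
  trypsinAltGo protein.toList (PySem.Str.len protein)
    ((PySem.Str.len protein).toNat + 1) 0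

-- ===== PRECONDITION & SPEC =====
def Spec_trypsin (protein : String) (out : List (Int × Int)) : Prop := out = trypsin_alt protein
instance (protein : String) (out : List (Int × Int)) : Decidable (Spec_trypsin protein out) := by unfold Spec_trypsin; infer_instance

-- ===== CLAIM (what is proved, stated in full; the proofs are below) =====
def Claim_equal_trypsin : Prop := ∀ (protein : String), Dom_trypsin protein → Spec_trypsin protein (trypsin protein)

-- ===== LEMMAS AND PROOFS =====

-- the (shifted) cut list after `start`: C(start) = [i+1 | i ∈ range(start, n-1), p i]
def pvCuts (p : Int → Bool) (n : Int) (start : Int) : List Int :=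
  ((PySem.List.pyRange start (n - 1) 1).filter p).map (· + 1)

-- find? = head of filter
theorem find?_eq_head?_filter {α : Type} (p : α → Bool) :
    ∀ (l : List α), l.find? p = (l.filter p).head? := by
  intro l
  induction l with
  | nil => rfl
  | cons a l ih =>
    by_cases h : p a
    · rw [List.find?_cons_of_pos h, List.filter_cons_of_pos h]; rfl
    · rw [List.find?_cons_of_neg h, List.filter_cons_of_neg h, ih]

-- shifting a unit-step range by one
theorem pyRange_shift_one (a b : Int) :
    PySem.List.pyRange (a + 1) (b + 1) 1 = (PySem.List.pyRange a b 1).map (· + 1) := by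
  rw [PySem.List.pyRange_one a b, PySem.List.pyRange_one (a + 1) (b + 1)]
  simp only [List.map_map]
  have h : b + 1 - (a + 1) = b - a := by ring
  rw [h]
  apply List.map_congr_left
  intro k _
  simp; ring

-- after the first match x of a unit range's filter, the rest is the filter from x+1
theorem filter_pyRange_step (p : Int → Bool) :
    ∀ (fuel : Nat) (a b x : Int) (xs : List Int), (b - a).toNat ≤ fuel →
      (PySem.List.pyRange a b 1).filter p = x :: xs →
      (PySem.List.pyRange (x + 1) b 1).filter p = xs := by
  intro fuel
  induction fuel with
  | zero =>
    intro a b x xs hf h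
    rw [PySem.List.pyRange_one_eq_nil (by omega)] at h
    simp at h
  | succ f ih =>
    intro a b x xs hf h
    by_cases hab : a < b
    · rw [PySem.List.pyRange_one_cons hab] at h
      by_cases hp : p a
      · rw [List.filter_cons_of_pos hp] at h
        obtain ⟨rfl, rfl⟩ : a = x ∧ (PySem.List.pyRange (a + 1) b 1).filter p = xs := by
          constructor <;> [exact (List.cons_eq_cons.mp h).1; exact (List.cons_eq_cons.mp h).2]
        rfl
      · rw [List.filter_cons_of_neg hp] at h
        exact ih (a + 1) b x xs (by omega) h
    · rw [PySem.List.pyRange_one_eq_nil (by omega)] at h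
      simp at h

-- main invariant of B's recursion: with enough fuel it produces the zip of
-- consecutive boundaries built from the remaining cut points
theorem trypsinAltGo_spec (cs : List Char) (n : Int) :
    ∀ (fuel : Nat) (start : Int), (n - start).toNat < fuel →
      trypsinAltGo cs n fuel start
        = List.zip (start :: pvCuts (fun i =>
              (PySem.List.pyGet? cs i == some 'K' || PySem.List.pyGet? cs i == some 'R')
              && !(PySem.List.pyGet? cs (i + 1) == some 'P')) n start)
            (pvCuts (fun i =>
              (PySem.List.pyGet? cs i == some 'K' || PySem.List.pyGet? cs i == some 'R')
              && !(PySem.List.pyGet? cs (i + 1) == some 'P')) n start ++ [n]) := by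
  set p : Int → Bool := fun i =>
    (PySem.List.pyGet? cs i == some 'K' || PySem.List.pyGet? cs i == some 'R')
    && !(PySem.List.pyGet? cs (i + 1) == some 'P') with hp
  intro fuel
  induction fuel with
  | zero => intro start h; omega
  | succ f ih =>
    intro start hf
    have hshift : (PySem.List.pyRange (start + 1) n 1).filter
        (fun j => (PySem.List.pyGet? cs (j - 1) == some 'K'
                    || PySem.List.pyGet? cs (j - 1) == some 'R')
                  && !(PySem.List.pyGet? cs j == some 'P'))
        = pvCuts p n start := by
      have h1 : PySem.List.pyRange (start + 1) n 1
          = (PySem.List.pyRange start (n - 1) 1).map (· + 1) := by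
        have := pyRange_shift_one start (n - 1)
        simpa using this
      rw [h1, List.filter_map, pvCuts]
      congr 1
      apply List.filter_congr
      intro i _
      simp [hp]
    show (match (PySem.List.pyRange (start + 1) n 1).find?
        (fun j => (PySem.List.pyGet? cs (j - 1) == some 'K'
                    || PySem.List.pyGet? cs (j - 1) == some 'R')
                  && !(PySem.List.pyGet? cs j == some 'P')) with
      | none => [(start, n)]
      | some j => [(start, j)] ++ trypsinAltGo cs n f j)
      = _
    rw [find?_eq_head?_filter, hshift]
    cases hC : pvCuts p n start with
    | nil => simp [List.zip]
    | cons j rest =>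
      have hjmem : j ∈ PySem.List.pyRange (start + 1) n 1 := by
        have : j ∈ pvCuts p n start := by rw [hC]; exact List.mem_cons_self ..
        rw [← hshift] at this
        exact List.mem_of_mem_filter this
      have hjb : start + 1 ≤ j ∧ j < n := (PySem.List.mem_pyRange_one).mp hjmem
      have hrest : pvCuts p n j = rest := by
        -- from pvCuts p n start = j :: rest, peel the first match
        obtain ⟨i0, rest', hfil, hmap⟩ :
            ∃ i0 rest', (PySem.List.pyRange start (n - 1) 1).filter p = i0 :: rest'
              ∧ i0 + 1 = j ∧ rest'.map (· + 1) = rest := by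
          unfold pvCuts at hC
          cases hF : (PySem.List.pyRange start (n - 1) 1).filter p with
          | nil => rw [hF] at hC; simp at hC
          | cons i0 rest' =>
            rw [hF] at hC
            simp only [List.map_cons, List.cons_eq_cons] at hC
            exact ⟨i0, rest', rfl, hC.1, hC.2⟩
        obtain ⟨hij, hmr⟩ := hmap
        have hstep := filter_pyRange_step p (n - 1 - start).toNat start (n - 1) i0 rest'
          (by omega) hfil
        unfold pvCuts
        rw [hij] at hstep
        rw [hstep, hmr]
      simp only [List.head?]
      rw [ih j (by omega), hrest]
      simp [List.zip]

-- A's loop, run over any index list with any predicate, produces exactly the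
-- zip of consecutive boundaries built from the filtered cut points.
theorem trypsin_go_spec (p : Int → Bool) (n : Int) :
    ∀ (L : List Int) (l : Int) (r : List (Int × Int)),
      (L.foldl (fun (st : Int × List (Int × Int)) i =>
          if p i then (i + 1, st.2 ++ [(st.1, i + 1)]) else st) (l, r)).2
        ++ [((L.foldl (fun (st : Int × List (Int × Int)) i =>
          if p i then (i + 1, st.2 ++ [(st.1, i + 1)]) else st) (l, r)).1, n)]
      = r ++ List.zip (l :: (L.filter p).map (· + 1)) ((L.filter p).map (· + 1) ++ [n]) := by
  intro L
  induction L with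
  | nil => intro l r; simp
  | cons i L ih =>
    intro l r
    by_cases h : p i
    · simp only [List.foldl_cons, List.filter_cons, h, if_pos, List.map_cons]
      rw [ih (i + 1) (r ++ [(l, i + 1)])]
      simp [List.zip]
    · simp only [List.foldl_cons, List.filter_cons, h, if_neg, Bool.false_eq_true,
        not_false_iff]
      rw [ih l r]

-- ===== VERDICT (by name: the statement is the Claim_ definition above) =====
theorem trypsin_spec : Claim_equal_trypsin := by
  intro protein _
  unfold Spec_trypsin trypsin trypsin_alt
  rw [trypsin_go_spec
    (fun i =>
      (PySem.List.pyGet? protein.toList i == some 'K'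
        || PySem.List.pyGet? protein.toList i == some 'R')
      && !(PySem.List.pyGet? protein.toList (i + 1) == some 'P'))
    (PySem.Str.len protein) (PySem.List.pyRange 0 (PySem.Str.len protein - 1) 1) 0 []]
  rw [trypsinAltGo_spec protein.toList (PySem.Str.len protein)
    ((PySem.Str.len protein).toNat + 1) 0 (by omega)]
  simp [pvCuts]
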